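-- pv_equiv track=rewrite | github.com/rmoser/Python_Learning | AdventOfCode/2016/aoc16_07.py | ssl
-- ===== SOURCE A (Python) =====
-- def ssl(aba, bab):
--     ab_list = []
--     for w in aba:
--         for s in zip(w[:-2], w[2:], w[1:-1]):
--             if s[0] == s[1] and s[0] != s[2]:
--                 ab_list.append(s[2] + s[0] + s[2])
--
--     if any(ab in s for ab in ab_list for s in bab):
--         return True
--     return False
-- ===== SOURCE B (Python) =====
-- def ssl(aba, bab):
--     pairs = set()
--     for s in bab:
--         for i in range(len(s) - 2):
--             if s[i] == s[i + 2] and s[i] != s[i + 1]: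
--                 pairs.add((s[i], s[i + 1]))
--     for w in aba:
--         for i in range(len(w) - 2):
--             if w[i] == w[i + 2] and w[i] != w[i + 1] and (w[i + 1], w[i]) in pairs:
--                 return True
--     return False
-- ===== Notes on version B (the rewrite author's own statement) =====
-- stated objective: alternative
-- what changed: Instead of building every target 'bab' string from the aba words and substring-scanning every bab word for each of them, B indexes the ABA-shaped triples of the bab words into a set of (outer, inner) pairs once, then makes a single filtered pass over the aba words with an O(1) pair lookup.
import Mathlib
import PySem

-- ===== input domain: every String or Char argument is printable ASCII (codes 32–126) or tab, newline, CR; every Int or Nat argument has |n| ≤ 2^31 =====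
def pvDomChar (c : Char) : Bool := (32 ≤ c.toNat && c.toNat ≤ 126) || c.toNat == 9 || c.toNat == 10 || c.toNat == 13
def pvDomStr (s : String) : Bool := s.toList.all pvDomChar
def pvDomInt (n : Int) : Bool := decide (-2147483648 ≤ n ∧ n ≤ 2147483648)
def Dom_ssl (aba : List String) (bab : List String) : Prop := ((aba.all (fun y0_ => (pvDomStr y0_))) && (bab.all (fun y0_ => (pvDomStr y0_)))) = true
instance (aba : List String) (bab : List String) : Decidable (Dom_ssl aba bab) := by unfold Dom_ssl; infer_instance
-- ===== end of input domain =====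

-- B indexes the bab-side ABA patterns into a set once and does a single filtered pass over aba
-- (no target-string building, no repeated substring scans of bab); objective: alternative.

-- ===== PORT A =====
-- Strings handled as Char lists (PySem-exact); the built string s[2]+s[0]+s[2] is the 3-char list [s2,s0,s2].
def ssl (aba : List String) (bab : List String) : Bool :=
  let ab_list : List (List Char) :=
    aba.foldl (fun acc w =>
      ((((PySem.Str.slice w none (some (-2))).toList).zip
          ((PySem.Str.slice w (some 2) none).toList)).zip
          ((PySem.Str.slice w (some 1) (some (-1))).toList)).foldl
        (fun acc2 s =>
          if s.1.1 == s.1.2 && !(s.1.1 == s.2) then acc2 ++ [[s.2, s.1.1, s.2]] else acc2)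
        acc) []
  if ab_list.any (fun ab => bab.any (fun s => PySem.Chars.isIn ab s.toList)) then true else false

-- ===== PORT B =====
-- pairs = the set of (outer, inner) of every ABA-shaped triple occurring in a bab word
def sslAltPairs (bab : List String) : PySem.Set (Char × Char) :=
  bab.foldl (fun acc s =>
    (PySem.List.pyRange 0 ((s.toList.length : Int) - 2) 1).foldl (fun p i =>
      if PySem.List.pyGetD s.toList i ' ' == PySem.List.pyGetD s.toList (i+2) ' ' &&
         !(PySem.List.pyGetD s.toList i ' ' == PySem.List.pyGetD s.toList (i+1) ' ') then
        PySem.Set.add p (PySem.List.pyGetD s.toList i ' ', PySem.List.pyGetD s.toList (i+1) ' ')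
      else p) acc) PySem.Set.empty

def ssl_alt (aba : List String) (bab : List String) : Bool :=
  let pairs := sslAltPairs bab
  aba.any (fun w =>
    (PySem.List.pyRange 0 ((w.toList.length : Int) - 2) 1).any (fun i =>
      PySem.List.pyGetD w.toList i ' ' == PySem.List.pyGetD w.toList (i+2) ' ' &&
      !(PySem.List.pyGetD w.toList i ' ' == PySem.List.pyGetD w.toList (i+1) ' ') &&
      PySem.Set.contains pairs (PySem.List.pyGetD w.toList (i+1) ' ', PySem.List.pyGetD w.toList i ' ')))

-- ===== PRECONDITION & SPEC =====
def Spec_ssl (aba : List String) (bab : List String) (out : Bool) : Prop := out = ssl_alt aba bab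
instance (aba : List String) (bab : List String) (out : Bool) : Decidable (Spec_ssl aba bab out) := by unfold Spec_ssl; infer_instance

-- ===== CLAIM (what is proved, stated in full; the proofs are below) =====
def Claim_equal_ssl : Prop := ∀ (aba : List String) (bab : List String), Dom_ssl aba bab → Spec_ssl aba bab (ssl aba bab)

-- ===== LEMMAS AND PROOFS =====

-- cs has x,y,x at positions j, j+1, j+2
def Trip (x y : Char) (cs : List Char) : Prop :=
  ∃ j, cs[j]? = some x ∧ cs[j+1]? = some y ∧ cs[j+2]? = some x

-- generic accumulation: a foldl whose step only appends to the accumulator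
theorem mem_foldl_acc {α β : Type} (g : List α → β → List α) (Q : α → β → Prop)
    (h : ∀ acc x p, p ∈ g acc x ↔ p ∈ acc ∨ Q p x) :
    ∀ (l : List β) (acc : List α) (p : α),
      p ∈ l.foldl g acc ↔ p ∈ acc ∨ ∃ x ∈ l, Q p x := by
  intro l
  induction l with
  | nil => simp
  | cons y ys ih =>
    intro acc p
    rw [List.foldl_cons, ih, h]
    simp only [List.mem_cons]
    constructor
    · rintro ((hp | hq) | ⟨x, hx, hq⟩)
      · exact Or.inl hp
      · exact Or.inr ⟨y, Or.inl rfl, hq⟩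
      · exact Or.inr ⟨x, Or.inr hx, hq⟩
    · rintro (hp | ⟨x, (rfl | hx), hq⟩)
      · exact Or.inl (Or.inl hp)
      · exact Or.inl (Or.inr hq)
      · exact Or.inr ⟨x, hx, hq⟩

theorem slice3_eq (cs : List Char) :
    PySem.List.slice cs (some 1) (some (-1)) = (cs.drop 1).take (cs.length - 2) := by
  cases cs with
  | nil => simp [PySem.List.slice]
  | cons c t =>
    simp [PySem.List.slice, PySem.List.clampIdx]
    split <;> omega

theorem zipA_eq (cs : List Char) :
    (((PySem.List.slice cs none (some (-2))).zip
        (PySem.List.slice cs (some 2) none)).zip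
        (PySem.List.slice cs (some 1) (some (-1))))
      = (List.range (cs.length - 2)).map
          (fun i => ((cs.getD i ' ', cs.getD (i+2) ' '), cs.getD (i+1) ' ')) := by
  rw [slice3_eq, PySem.List.slice_to_neg_ofNat cs 2 (by omega),
    show ((2:Int)) = ((2:Nat):Int) from rfl, PySem.List.slice_from_natCast]
  apply List.ext_getElem
  · simp; omega
  · intro i h1 h2
    have hi : i < cs.length - 2 := by simpa using h2
    simp [List.getElem_zip, List.getElem_take, List.getElem_drop, List.getD_eq_getElem?_getD]
    refine ⟨⟨?_, ?_⟩, ?_⟩ <;>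
      rw [List.getElem?_eq_getElem (by omega)] <;> simp <;> congr 1 <;> omega

theorem getElem?_eq_getD (cs : List Char) (i : Nat) (hi : i < cs.length) :
    cs[i]? = some (cs.getD i ' ') := by
  simp [List.getElem?_eq_getElem hi, List.getD_eq_getElem?_getD]

theorem trip_index_iff (cs : List Char) (a c : Char) :
    (∃ k, k < cs.length - 2 ∧ cs.getD k ' ' = a ∧ cs.getD (k+2) ' ' = a ∧ cs.getD (k+1) ' ' = c)
      ↔ Trip a c cs := by
  constructor
  · rintro ⟨k, hk, h0, h2, h1⟩
    exact ⟨k, by rw [getElem?_eq_getD cs k (by omega), h0],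
      by rw [getElem?_eq_getD cs (k+1) (by omega), h1],
      by rw [getElem?_eq_getD cs (k+2) (by omega), h2]⟩
  · rintro ⟨j, h0, h1, h2⟩
    have hj : j + 2 < cs.length := by
      by_contra h
      simp [List.getElem?_eq_none (by omega : cs.length ≤ j + 2)] at h2
    refine ⟨j, by omega, ?_, ?_, ?_⟩
    · rw [getElem?_eq_getD cs j (by omega)] at h0
      exact Option.some_injective _ h0.symm |>.symm
    · rw [getElem?_eq_getD cs (j+2) (by omega)] at h2
      exact (Option.some_injective _ h2).symm ▸ rfl
    · rw [getElem?_eq_getD cs (j+1) (by omega)] at h1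
      exact (Option.some_injective _ h1).symm ▸ rfl

theorem prefix3_iff (x y z : Char) (t : List Char) :
    [x, y, z] <+: t ↔ t[0]? = some x ∧ t[1]? = some y ∧ t[2]? = some z := by
  constructor
  · rintro ⟨u, rfl⟩; simp
  · rintro ⟨h0, h1, h2⟩
    match t, h0, h1, h2 with
    | _ :: _ :: _ :: rest, h0, h1, h2 => simp_all

theorem isIn_iff_trip (c a : Char) (s : List Char) :
    PySem.Chars.isIn [c, a, c] s = true ↔ Trip c a s := by
  rw [← PySem.Chars.exists_prefix_drop_iff_isIn]
  constructor
  · rintro ⟨j, hp⟩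
    rw [prefix3_iff] at hp
    exact ⟨j, by simpa using hp.1, by simpa using hp.2.1, by simpa using hp.2.2⟩
  · rintro ⟨j, h0, h1, h2⟩
    exact ⟨j, (prefix3_iff c a c _).2 ⟨by simpa using h0, by simpa using h1, by simpa using h2⟩⟩

-- the A-side inner zip loop, in terms of Trip
theorem zip_exists_iff (w : String) (p : List Char) :
    (∃ s ∈ (((PySem.Str.slice w none (some (-2))).toList).zip
              ((PySem.Str.slice w (some 2) none).toList)).zip
              ((PySem.Str.slice w (some 1) (some (-1))).toList),
        (s.1.1 == s.1.2 && !(s.1.1 == s.2)) = true ∧ p = [s.2, s.1.1, s.2])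
      ↔ ∃ a c : Char, a ≠ c ∧ Trip a c w.toList ∧ p = [c, a, c] := by
  have hb : ∀ (a? b? : Option Int),
      (PySem.Str.slice w a? b?).toList = PySem.List.slice w.toList a? b? := by
    intro a? b?; simp [PySem.Str.slice]
  rw [hb, hb, hb, zipA_eq]
  constructor
  · rintro ⟨s, hs, hc, rfl⟩
    simp only [List.mem_map, List.mem_range] at hs
    obtain ⟨i, hi, rfl⟩ := hs
    simp only [Bool.and_eq_true, beq_iff_eq, Bool.not_eq_true', beq_eq_false_iff_ne, ne_eq] at hc
    exact ⟨_, _, hc.2, (trip_index_iff _ _ _).1 ⟨i, hi, rfl, hc.1.symm, rfl⟩, rfl⟩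
  · rintro ⟨a, c, hac, ht, rfl⟩
    obtain ⟨k, hk, h0, h2, h1⟩ := (trip_index_iff w.toList a c).2 ht
    refine ⟨((w.toList.getD k ' ', w.toList.getD (k+2) ' '), w.toList.getD (k+1) ' '), ?_, ?_, ?_⟩
    · simp only [List.mem_map, List.mem_range]; exact ⟨k, hk, rfl⟩
    · rw [h0, h2, h1]; simp [hac]
    · rw [h0, h1]

theorem ssl_iff (aba bab : List String) :
    ssl aba bab = true ↔
      ∃ w ∈ aba, ∃ a c : Char, a ≠ c ∧ Trip a c w.toList ∧ ∃ s ∈ bab, Trip c a s.toList := by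
  unfold ssl
  have hmem := mem_foldl_acc
    (fun acc w => ((((PySem.Str.slice w none (some (-2))).toList).zip
        ((PySem.Str.slice w (some 2) none).toList)).zip
        ((PySem.Str.slice w (some 1) (some (-1))).toList)).foldl
      (fun acc2 s =>
        if s.1.1 == s.1.2 && !(s.1.1 == s.2) then acc2 ++ [[s.2, s.1.1, s.2]] else acc2) acc)
    (fun p w => ∃ a c : Char, a ≠ c ∧ Trip a c w.toList ∧ p = [c, a, c])
    (by
      intro acc w p
      rw [mem_foldl_acc _
        (fun p s => (s.1.1 == s.1.2 && !(s.1.1 == s.2)) = true ∧ p = [s.2, s.1.1, s.2])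
        (by
          intro acc2 x p2
          split_ifs with h <;> simp [h])]
      rw [zip_exists_iff])
    aba []
  have hss : ∀ b : Bool, (if b = true then true else false) = true ↔ b = true := by decide
  rw [hss, List.any_eq_true]
  simp only [List.any_eq_true]
  constructor
  · rintro ⟨ab, hab, s, hs, hin⟩
    obtain ⟨w, hw, a, c, hac, ht, rfl⟩ := by simpa using (hmem ab).1 hab
    exact ⟨w, hw, a, c, hac, ht, s, hs, (isIn_iff_trip c a s.toList).1 hin⟩
  · rintro ⟨w, hw, a, c, hac, ht, s, hs, hts⟩
    refine ⟨[c, a, c], (hmem [c, a, c]).2 (Or.inr ⟨w, hw, a, c, hac, ht, rfl⟩),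
      s, hs, (isIn_iff_trip c a s.toList).2 hts⟩

-- the B-side index loop over a word, in terms of Trip
theorem pyrange_trip_iff (cs : List Char) (Q : Char → Char → Prop) :
    (∃ i ∈ PySem.List.pyRange 0 ((cs.length : Int) - 2) 1,
        ((PySem.List.pyGetD cs i ' ' == PySem.List.pyGetD cs (i+2) ' ' &&
          !(PySem.List.pyGetD cs i ' ' == PySem.List.pyGetD cs (i+1) ' ')) = true ∧
          Q (PySem.List.pyGetD cs i ' ') (PySem.List.pyGetD cs (i+1) ' ')))
      ↔ ∃ a c : Char, a ≠ c ∧ Trip a c cs ∧ Q a c := by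
  constructor
  · rintro ⟨i, hi, hc, hq⟩
    rw [PySem.List.mem_pyRange_one] at hi
    obtain ⟨k, rfl⟩ : ∃ k : Nat, i = (k : Int) := ⟨i.toNat, (Int.toNat_of_nonneg hi.1).symm⟩
    have e1 : (k : Int) + 1 = ((k + 1 : Nat) : Int) := by push_cast; ring
    have e2 : (k : Int) + 2 = ((k + 2 : Nat) : Int) := by push_cast; ring
    simp only [e1, e2, PySem.List.pyGetD_natCast] at hc hq
    simp only [Bool.and_eq_true, beq_iff_eq, Bool.not_eq_true', beq_eq_false_iff_ne, ne_eq] at hc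
    exact ⟨_, _, hc.2, (trip_index_iff _ _ _).1 ⟨k, by omega, rfl, hc.1.symm, rfl⟩, hq⟩
  · rintro ⟨a, c, hac, ht, hq⟩
    obtain ⟨k, hk, h0, h2, h1⟩ := (trip_index_iff cs a c).2 ht
    refine ⟨(k : Int), ?_, ?_, ?_⟩
    · rw [PySem.List.mem_pyRange_one]; omega
    · have e1 : (k : Int) + 1 = ((k + 1 : Nat) : Int) := by push_cast; ring
      have e2 : (k : Int) + 2 = ((k + 2 : Nat) : Int) := by push_cast; ring
      rw [e1, e2]
      simp only [PySem.List.pyGetD_natCast, h0, h2, h1]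
      simp [hac]
    · have e1 : (k : Int) + 1 = ((k + 1 : Nat) : Int) := by push_cast; ring
      rw [e1]
      simp only [PySem.List.pyGetD_natCast, h0, h1]
      exact hq

theorem mem_pairs_iff (bab : List String) (p : Char × Char) :
    p ∈ sslAltPairs bab ↔ ∃ s ∈ bab, p.1 ≠ p.2 ∧ Trip p.1 p.2 s.toList := by
  unfold sslAltPairs
  rw [mem_foldl_acc _
    (fun p s => ∃ a c : Char, a ≠ c ∧ Trip a c s.toList ∧ p = (a, c))
    (by
      intro acc s q
      rw [mem_foldl_acc _
        (fun q i => ((PySem.List.pyGetD s.toList i ' ' == PySem.List.pyGetD s.toList (i+2) ' ' &&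
            !(PySem.List.pyGetD s.toList i ' ' == PySem.List.pyGetD s.toList (i+1) ' ')) = true ∧
            q = (PySem.List.pyGetD s.toList i ' ', PySem.List.pyGetD s.toList (i+1) ' ')))
        (by
          intro acc2 i q2
          split_ifs with h
          · rw [PySem.Set.mem_add]; simp [h]
          · simp [h])]
      rw [pyrange_trip_iff s.toList (fun a c => q = (a, c))])]
  simp only [PySem.Set.empty, List.not_mem_nil, false_or]
  constructor
  · rintro ⟨s, hs, a, c, hac, ht, rfl⟩
    exact ⟨s, hs, hac, ht⟩
  · rintro ⟨s, hs, hac, ht⟩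
    exact ⟨s, hs, p.1, p.2, hac, ht, rfl⟩

theorem ssl_alt_iff (aba bab : List String) :
    ssl_alt aba bab = true ↔
      ∃ w ∈ aba, ∃ a c : Char, a ≠ c ∧ Trip a c w.toList ∧ (c, a) ∈ sslAltPairs bab := by
  unfold ssl_alt
  simp only [List.any_eq_true]
  have hq : ∀ w : String,
      (∃ i ∈ PySem.List.pyRange 0 ((w.toList.length : Int) - 2) 1,
        (PySem.List.pyGetD w.toList i ' ' == PySem.List.pyGetD w.toList (i+2) ' ' &&
         !(PySem.List.pyGetD w.toList i ' ' == PySem.List.pyGetD w.toList (i+1) ' ') &&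
         PySem.Set.contains (sslAltPairs bab)
           (PySem.List.pyGetD w.toList (i+1) ' ', PySem.List.pyGetD w.toList i ' ')) = true)
      ↔ ∃ a c : Char, a ≠ c ∧ Trip a c w.toList ∧ (c, a) ∈ sslAltPairs bab := by
    intro w
    rw [← pyrange_trip_iff w.toList (fun a c => (c, a) ∈ sslAltPairs bab)]
    apply exists_congr; intro i
    apply and_congr_right; intro _
    rw [Bool.and_eq_true, PySem.Set.contains_iff]
  constructor
  · rintro ⟨w, hw, h⟩
    exact ⟨w, hw, (hq w).1 h⟩
  · rintro ⟨w, hw, hrest⟩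
    exact ⟨w, hw, (hq w).2 hrest⟩

-- ===== VERDICT (by name: the statement is the Claim_ definition above) =====
theorem ssl_spec : Claim_equal_ssl := by
  intro aba bab _
  unfold Spec_ssl
  rw [Bool.eq_iff_iff, ssl_iff, ssl_alt_iff]
  constructor
  · rintro ⟨w, hw, a, c, hac, ht, s, hs, hts⟩
    exact ⟨w, hw, a, c, hac, ht, (mem_pairs_iff bab (c, a)).2 ⟨s, hs, fun h => hac h.symm, hts⟩⟩
  · rintro ⟨w, hw, a, c, hac, ht, hp⟩
    obtain ⟨s, hs, _, hts⟩ := (mem_pairs_iff bab (c, a)).1 hp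
    exact ⟨w, hw, a, c, hac, ht, s, hs, hts⟩
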